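-- pv_equiv track=rewrite | github.com/clarencenhuang/programming-challenges | leetcode/517_super_washing_machine.py | inefficient
-- ===== SOURCE A (Python) =====
-- from itertools import accumulate
--
-- def inefficient(machines):
--     total = sum(machines)
--     if total % len(machines) != 0:
--         return -1
--     per_machine = total // len(machines)
--     level_table = list(accumulate([per_machine] * len(machines)))
--     moves = 0
--     while len(set(machines)) > 1:
--         cur_sum = 0
--         moved = set()
--         for i, level in enumerate(level_table):
--             if i == len(level_table) - 1:
--                 break
--             cur_sum += machines[i]
--             if cur_sum < level and machines[i + 1] > 0 and (i + 1) not in moved: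
--                 cur_sum += 1
--                 machines[i] += 1
--                 machines[i + 1] -= 1
--                 moved.add(i + 1)
--             elif cur_sum > level and machines[i] > 0 and i not in moved:
--                 cur_sum -= 1
--                 machines[i] -= 1
--                 machines[i + 1] += 1
--                 moved.add(i)
--         moves += 1
--     return moves
-- ===== SOURCE B (Python) =====
-- def inefficient(machines):
--     total = sum(machines)
--     if total % len(machines) != 0:
--         return -1
--     avg = total // len(machines)
--     ans = 0
--     bal = 0
--     for x in machines:
--         bal += x - avg
--         ans = max(ans, abs(bal), x - avg)
--     return ans
-- ===== Notes on version B (the rewrite author's own statement) =====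
-- stated objective: simpler
-- what changed: replaced A's pass-by-pass simulation of dress moves (one full sweep of the list per counted move until all machines are equal) by the one-pass closed form max(max surplus x-avg, max |running prefix imbalance|).
-- outside the precondition, e.g. on inefficient([-5, 0, 5]): A returns 6, B returns 5; on inefficient([3, -5]): A does not finish within the time limit, B returns 4
import Mathlib
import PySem

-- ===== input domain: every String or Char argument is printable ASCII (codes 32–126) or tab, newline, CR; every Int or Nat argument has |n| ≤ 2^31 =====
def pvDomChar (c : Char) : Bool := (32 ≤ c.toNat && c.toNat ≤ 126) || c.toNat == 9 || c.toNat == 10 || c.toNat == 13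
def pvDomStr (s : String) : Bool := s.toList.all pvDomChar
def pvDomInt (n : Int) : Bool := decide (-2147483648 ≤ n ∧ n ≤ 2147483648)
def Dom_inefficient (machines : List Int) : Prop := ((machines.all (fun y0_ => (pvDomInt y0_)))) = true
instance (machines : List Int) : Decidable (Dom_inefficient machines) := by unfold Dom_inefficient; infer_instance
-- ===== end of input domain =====

-- B replaces A's pass-by-pass simulation by the simpler one-pass closed form
-- max(max surplus, max |prefix imbalance|).
-- Python A mutates its argument list in place; the equivalence proved here is about the return value only.

-- ===== PORT A =====
-- list(accumulate(xs)) starting from a running total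
def pyAccumulate (acc : Int) : List Int → List Int
  | [] => []
  | x :: rest => (acc + x) :: pyAccumulate (acc + x) rest

-- the inner 'for i, level in enumerate(level_table)' loop; the 'break' at i == len-1 returns the state.
-- All index accesses are in range on the inputs reached (i < len-1), so pyGetD/pySetD are exact.
def ineffFor (nlt : Int) : List (Int × Int) → (List Int × Int × PySem.Set Int) → (List Int × Int × PySem.Set Int)
  | [], st => st
  | (i, level) :: rest, st =>
    if i = nlt - 1 then st      -- break
    else
      let mach := st.1
      let cur := st.2.1 + PySem.List.pyGetD mach i 0      -- cur_sum += machines[i]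
      let moved := st.2.2
      if cur < level ∧ 0 < PySem.List.pyGetD mach (i+1) 0 ∧ (i+1) ∉ moved then
        let mach1 := PySem.List.pySetD mach i (PySem.List.pyGetD mach i 0 + 1)
        let mach2 := PySem.List.pySetD mach1 (i+1) (PySem.List.pyGetD mach1 (i+1) 0 - 1)
        ineffFor nlt rest (mach2, cur + 1, moved.add (i+1))
      else if level < cur ∧ 0 < PySem.List.pyGetD mach i 0 ∧ i ∉ moved then
        let mach1 := PySem.List.pySetD mach i (PySem.List.pyGetD mach i 0 - 1)
        let mach2 := PySem.List.pySetD mach1 (i+1) (PySem.List.pyGetD mach1 (i+1) 0 + 1)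
        ineffFor nlt rest (mach2, cur - 1, moved.add i)
      else
        ineffFor nlt rest (mach, cur, moved)

-- the 'while len(set(machines)) > 1' loop; fuel only makes the recursion structural — on Pre_
-- the loop is proved to finish within it (a pass per unit of the proved potential, ≤ Σ|machines|).
def ineffWhile (levels : List Int) (nlt : Int) : Nat → List Int → Int → Int
  | 0, _, moves => moves
  | fuel+1, mach, moves =>
    if 1 < PySem.Set.len (PySem.Set.ofList mach) then
      let st := ineffFor nlt (PySem.List.enumerate levels 0) (mach, 0, PySem.Set.empty)
      ineffWhile levels nlt fuel st.1 (moves + 1)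
    else moves

def inefficient (machines : List Int) : Int :=
  let total := machines.sum
  if PySem.Int.mod total (machines.length : Int) ≠ 0 then -1
  else
    let per := PySem.Int.floordiv total (machines.length : Int)
    let levels := pyAccumulate 0 (List.replicate machines.length per)
    ineffWhile levels (levels.length : Int) ((machines.map Int.natAbs).sum + 1) machines 0

-- ===== PORT B =====
def inefficient_alt (machines : List Int) : Int :=
  let total := machines.sum
  if PySem.Int.mod total (machines.length : Int) ≠ 0 then -1
  else
    let avg := PySem.Int.floordiv total (machines.length : Int)
    (machines.foldl (fun (st : Int × Int) x =>
      let bal := st.2 + (x - avg)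
      (max (max st.1 |bal|) (x - avg), bal)) (0, 0)).1

-- ===== PRECONDITION & SPEC =====
-- Pre_ excludes the empty list (A raises ZeroDivisionError at 'total % len(machines)') and the
-- unequalisable lists outside the problem's natural domain of nonnegative loads — those with a negative
-- entry whose sum is divisible by the length and not already constant: there A's move simulation can
-- loop forever, and where it does halt its pass count is an artefact of its blocked-move rules
-- (e.g. on [-5, 0, 5] A returns 6 while the balancing minimum B computes is 5).
def Pre_inefficient (machines : List Int) : Prop :=
  machines ≠ [] ∧
    (machines.sum % (machines.length : Int) ≠ 0 ∨ (∀ x ∈ machines, 0 ≤ x) ∨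
      (∀ x ∈ machines, ∀ y ∈ machines, x = y))
instance (machines : List Int) : Decidable (Pre_inefficient machines) := by unfold Pre_inefficient; infer_instance
def pvWitness_inefficient : List Int := [1, 0, 2]

def Spec_inefficient (machines : List Int) (out : Int) : Prop := out = inefficient_alt machines
instance (machines : List Int) (out : Int) : Decidable (Spec_inefficient machines out) := by unfold Spec_inefficient; infer_instance

-- ===== CLAIM (what is proved, stated in full; the proofs are below) =====
def Claim_equal_inefficient : Prop := ∀ (machines : List Int), Dom_inefficient machines → Pre_inefficient machines → Spec_inefficient machines (inefficient machines)

-- ===== LEMMAS AND PROOFS =====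

-- j-th machine, as Python reads it (indices in range on all uses)
def mGet (ms : List Int) (j : Nat) : Int := ms.getD j 0
-- prefix imbalance after machine j: sum of the first j+1 loads minus their target
def eBal (ms : List Int) (avg : Int) (j : Nat) : Int := (ms.take (j+1)).sum - (j+1) * avg
-- imbalance entering machine j (0 for j = 0)
def ePre (ms : List Int) (avg : Int) : Nat → Int
  | 0 => 0
  | k+1 => eBal ms avg k
-- the net move A's pass performs at boundary j (+1: one dress j+1→j, -1: one dress j→j+1), given the previous move
def mvStep (ms : List Int) (avg : Int) (j : Nat) (p : Int) : Int :=
  if j + 1 < ms.length then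
    if eBal ms avg j < 0 ∧ 0 < mGet ms (j+1) then 1
    else if 0 < eBal ms avg j ∧ p ≠ 1 ∧ p < mGet ms j then -1
    else 0
  else 0
def mv (ms : List Int) (avg : Int) : Nat → Int
  | 0 => mvStep ms avg 0 0
  | j+1 => mvStep ms avg (j+1) (mv ms avg j)
def pmv (ms : List Int) (avg : Int) : Nat → Int
  | 0 => 0
  | j+1 => mv ms avg j
-- the machine list after one full pass of A's inner loop
def newMach (ms : List Int) (avg : Int) : List Int :=
  (List.range ms.length).map (fun j => mGet ms j + mv ms avg j - pmv ms avg j)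
-- the potential: max over j of |prefix imbalance| and surplus
def term (ms : List Int) (avg : Int) (j : Nat) : Int := max |eBal ms avg j| (mGet ms j - avg)
def Pot (ms : List Int) (avg : Int) : Int := ((List.range ms.length).map (term ms avg)).foldl max 0

-- small foldl-max toolkit (specific to these folds)
theorem le_foldl_max_seed (l : List Int) (a : Int) : a ≤ l.foldl max a := by
  induction l generalizing a with
  | nil => simp
  | cons x t ih => exact le_trans (le_max_left a x) (ih (max a x))
theorem le_foldl_max_mem (l : List Int) (a x : Int) (hx : x ∈ l) : x ≤ l.foldl max a := by
  induction l generalizing a with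
  | nil => cases hx
  | cons y t ih =>
    rw [List.foldl_cons]
    rcases List.mem_cons.mp hx with rfl | hx'
    · exact le_trans (le_max_right a x) (le_foldl_max_seed t (max a x))
    · exact ih (max a y) hx'
theorem foldl_max_le (l : List Int) (a c : Int) (ha : a ≤ c) (h : ∀ x ∈ l, x ≤ c) :
    l.foldl max a ≤ c := by
  induction l generalizing a with
  | nil => simpa using ha
  | cons x t ih =>
    exact ih (max a x) (max_le ha (h x (List.mem_cons_self))) (fun y hy => h y (List.mem_cons_of_mem _ hy))
theorem foldl_max_attained (l : List Int) (a : Int) : l.foldl max a = a ∨ l.foldl max a ∈ l := by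
  induction l generalizing a with
  | nil => left; rfl
  | cons x t ih =>
    rcases ih (max a x) with h | h
    · rcases max_choice a x with hm | hm
      · left; rw [List.foldl_cons, h, hm]
      · right; rw [List.foldl_cons, h, hm]; exact List.mem_cons_self
    · right; exact List.mem_cons_of_mem _ h

theorem take_sum_succ (ms : List Int) (j : Nat) (hj : j < ms.length) :
    (ms.take (j+1)).sum = (ms.take j).sum + mGet ms j := by
  rw [List.take_add_one, List.sum_append]
  simp [mGet, List.getD_eq_getElem?_getD, List.getElem?_eq_getElem hj]

-- m in terms of e
theorem mGet_eq_e (ms : List Int) (avg : Int) (j : Nat) (hj : j < ms.length) :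
    mGet ms j = eBal ms avg j - ePre ms avg j + avg := by
  cases j with
  | zero =>
    have h := take_sum_succ ms 0 hj
    simp [eBal, ePre] at *
    omega
  | succ k =>
    have h := take_sum_succ ms (k+1) hj
    simp only [eBal, ePre, h]
    push_cast
    ring

theorem mv_eq_step (ms : List Int) (avg : Int) (j : Nat) :
    mv ms avg j = mvStep ms avg j (pmv ms avg j) := by
  cases j <;> rfl

theorem mv_mem (ms : List Int) (avg : Int) (j : Nat) :
    mv ms avg j = -1 ∨ mv ms avg j = 0 ∨ mv ms avg j = 1 := by
  rw [mv_eq_step]; unfold mvStep; split_ifs <;> simp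

theorem pmv_mem (ms : List Int) (avg : Int) (j : Nat) :
    pmv ms avg j = -1 ∨ pmv ms avg j = 0 ∨ pmv ms avg j = 1 := by
  cases j with
  | zero => simp [pmv]
  | succ k => exact mv_mem ms avg k

theorem mv_one (ms : List Int) (avg : Int) (j : Nat) (h : mv ms avg j = 1) :
    eBal ms avg j < 0 ∧ 0 < mGet ms (j+1) ∧ j + 1 < ms.length := by
  rw [mv_eq_step] at h; unfold mvStep at h
  split_ifs at h with h1 h2 h3 <;> first | exact ⟨h2.1, h2.2, h1⟩ | omega

theorem mv_negone (ms : List Int) (avg : Int) (j : Nat) (h : mv ms avg j = -1) :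
    0 < eBal ms avg j ∧ pmv ms avg j ≠ 1 ∧ pmv ms avg j < mGet ms j ∧ j + 1 < ms.length := by
  rw [mv_eq_step] at h; unfold mvStep at h
  split_ifs at h with h1 h2 h3 <;> first | exact ⟨h3.1, h3.2.1, h3.2.2, h1⟩ | omega

theorem mv_zero (ms : List Int) (avg : Int) (j : Nat) (h : mv ms avg j = 0)
    (hj : j + 1 < ms.length) :
    (eBal ms avg j < 0 → mGet ms (j+1) ≤ 0) ∧
    (0 < eBal ms avg j → pmv ms avg j ≠ 1 → mGet ms j ≤ pmv ms avg j) := by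
  rw [mv_eq_step] at h; unfold mvStep at h
  split_ifs at h with h1 h2
  · exact absurd h (by norm_num)
  · push Not at h1 h2
    exact ⟨h1, h2⟩

theorem mv_last (ms : List Int) (avg : Int) (j : Nat) (hj : ¬ j + 1 < ms.length) :
    mv ms avg j = 0 := by
  rw [mv_eq_step]; unfold mvStep; rw [if_neg hj]

theorem mGet_mem (ms : List Int) (j : Nat) (hj : j < ms.length) : mGet ms j ∈ ms := by
  simp only [mGet, List.getD_eq_getElem?_getD, List.getElem?_eq_getElem hj, Option.getD_some]
  exact List.getElem_mem hj

theorem take_sum_nonneg (ms : List Int) (hnn : ∀ x ∈ ms, 0 ≤ x) (j : Nat) :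
    0 ≤ (ms.take j).sum := by
  apply List.sum_nonneg
  intro x hx
  exact hnn x (List.mem_of_mem_take hx)

theorem take_sum_le (ms : List Int) (hnn : ∀ x ∈ ms, 0 ≤ x) (j : Nat) :
    (ms.take j).sum ≤ ms.sum := by
  conv_rhs => rw [← List.take_append_drop j ms]
  rw [List.sum_append]
  have : 0 ≤ (ms.drop j).sum := by
    apply List.sum_nonneg
    intro x hx
    exact hnn x (List.mem_of_mem_drop hx)
  omega

theorem newMach_length (ms : List Int) (avg : Int) : (newMach ms avg).length = ms.length := by
  simp [newMach]

theorem mGet_eq_getElem (ms : List Int) (j : Nat) (hj : j < ms.length) :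
    mGet ms j = ms[j] := by
  simp [mGet, List.getD_eq_getElem?_getD, List.getElem?_eq_getElem hj]

theorem newMach_get (ms : List Int) (avg : Int) (j : Nat) (hj : j < ms.length) :
    mGet (newMach ms avg) j = mGet ms j + mv ms avg j - pmv ms avg j := by
  simp [newMach, mGet, List.getD_eq_getElem?_getD, hj]

theorem newMach_take_sum (ms : List Int) (avg : Int) :
    ∀ j, j ≤ ms.length →
      ((newMach ms avg).take j).sum = (ms.take j).sum + pmv ms avg j := by
  intro j
  induction j with
  | zero => simp [pmv]
  | succ k ih =>
    intro hk
    have hklen : k < ms.length := by omega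
    have hklen' : k < (newMach ms avg).length := by rw [newMach_length]; exact hklen
    have h1 := take_sum_succ (newMach ms avg) k hklen'
    have h2 := take_sum_succ ms k hklen
    have h3 := newMach_get ms avg k hklen
    have h4 := ih (by omega)
    have h5 : pmv ms avg (k+1) = mv ms avg k := rfl
    omega

theorem eBal_newMach (ms : List Int) (avg : Int) (j : Nat) (hj : j < ms.length) :
    eBal (newMach ms avg) avg j = eBal ms avg j + mv ms avg j := by
  unfold eBal
  rw [newMach_take_sum ms avg (j+1) (by omega)]
  have : pmv ms avg (j+1) = mv ms avg j := rfl
  omega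

theorem newMach_sum (ms : List Int) (avg : Int) (hne : ms ≠ []) :
    (newMach ms avg).sum = ms.sum := by
  obtain ⟨k, hk⟩ : ∃ k, ms.length = k + 1 := by
    cases hms : ms with
    | nil => exact absurd hms hne
    | cons y t => exact ⟨t.length, by simp⟩
  have h1 : ((newMach ms avg).take ms.length).sum = (ms.take ms.length).sum + pmv ms avg ms.length :=
    newMach_take_sum ms avg ms.length le_rfl
  rw [List.take_of_length_le (le_of_eq (newMach_length ms avg)), List.take_length] at h1
  have h2 : pmv ms avg ms.length = 0 := by
    rw [hk]
    show mv ms avg k = 0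
    exact mv_last ms avg k (by omega)
  omega

theorem newMach_nonneg (ms : List Int) (avg : Int) (hnn : ∀ x ∈ ms, 0 ≤ x) :
    ∀ x ∈ newMach ms avg, 0 ≤ x := by
  intro x hx
  simp only [newMach, List.mem_map, List.mem_range] at hx
  obtain ⟨j, hj, rfl⟩ := hx
  have hmj : 0 ≤ mGet ms j := hnn _ (mGet_mem ms j hj)
  rcases mv_mem ms avg j with hmv | hmv | hmv
  · have := (mv_negone ms avg j hmv).2.2.1
    omega
  all_goals {
    have hpm : pmv ms avg j ≤ 0 ∨ (pmv ms avg j = 1 ∧ 1 ≤ mGet ms j) := by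
      rcases pmv_mem ms avg j with hp | hp | hp
      · left; omega
      · left; omega
      · right
        refine ⟨hp, ?_⟩
        cases j with
        | zero => simp [pmv] at hp
        | succ i =>
          have h1 := (mv_one ms avg i hp).2.1
          omega
    omega
  }

theorem bfold_gen (ms : List Int) (avg : Int) :
    ∀ (d k : Nat) (a : Int), k + d = ms.length →
      ((ms.drop k).foldl (fun (st : Int × Int) x =>
          let bal := st.2 + (x - avg); (max (max st.1 |bal|) (x - avg), bal))
        (a, (ms.take k).sum - (k : Int) * avg)).1
      = ((List.range' k d).map (term ms avg)).foldl max a := by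
  intro d
  induction d with
  | zero =>
    intro k a hk
    have hdrop : ms.drop k = [] := by rw [List.drop_eq_nil_iff]; omega
    simp [hdrop]
  | succ d ih =>
    intro k a hk
    have hklen : k < ms.length := by omega
    rw [List.drop_eq_getElem_cons hklen, List.range'_succ]
    simp only [List.foldl_cons, List.map_cons]
    have hget : ms[k] = mGet ms k := (mGet_eq_getElem ms k hklen).symm
    have hbal : (ms.take k).sum - (k:Int)*avg + (ms[k] - avg)
        = (ms.take (k+1)).sum - ((k+1 : Nat) : Int) * avg := by
      have h2 := take_sum_succ ms k hklen
      push_cast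
      rw [hget, h2]
      ring
    rw [hbal]
    have hseed : max (max a |(ms.take (k+1)).sum - ((k+1 : Nat) : Int) * avg|) (ms[k] - avg)
        = max a (term ms avg k) := by
      rw [max_assoc, hget]
      rfl
    rw [hseed]
    exact ih (k+1) (max a (term ms avg k)) (by omega)

theorem term_le_pot (ms : List Int) (avg : Int) (j : Nat) (hj : j < ms.length) :
    term ms avg j ≤ Pot ms avg := by
  apply le_foldl_max_mem
  exact List.mem_map_of_mem (List.mem_range.mpr hj)

theorem pot_nonneg (ms : List Int) (avg : Int) : 0 ≤ Pot ms avg :=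
  le_foldl_max_seed _ 0

theorem eBal_abs_le (ms : List Int) (avg : Int) (j : Nat) (hj : j < ms.length) :
    |eBal ms avg j| ≤ Pot ms avg :=
  le_trans (le_max_left _ _) (term_le_pot ms avg j hj)

theorem surplus_le (ms : List Int) (avg : Int) (j : Nat) (hj : j < ms.length) :
    mGet ms j - avg ≤ Pot ms avg :=
  le_trans (le_max_right _ _) (term_le_pot ms avg j hj)

theorem eBal_last (ms : List Int) (avg : Int) (k : Nat) (hk : ms.length = k + 1)
    (hsum : ms.sum = (ms.length : Int) * avg) : eBal ms avg k = 0 := by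
  unfold eBal
  rw [← hk, List.take_of_length_le le_rfl, hsum, hk]
  push_cast
  ring

theorem pot_zero_iff (ms : List Int) (avg : Int) :
    Pot ms avg = 0 ↔ ms = List.replicate ms.length avg := by
  constructor
  · intro hp
    have he : ∀ j < ms.length, eBal ms avg j = 0 := by
      intro j hj
      have := eBal_abs_le ms avg j hj
      rw [hp] at this
      have h2 := abs_le.mp this
      omega
    apply List.ext_getElem (by simp)
    intro j h1 h2
    rw [List.getElem_replicate, ← mGet_eq_getElem ms j h1,
        mGet_eq_e ms avg j h1, he j h1]
    cases j with
    | zero => simp [ePre]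
    | succ k => simp [ePre, he k (by omega)]
  · intro hrep
    have hterm : ∀ j < ms.length, term ms avg j = 0 := by
      intro j hj
      have h1 : eBal ms avg j = 0 := by
        unfold eBal
        conv_lhs => rw [hrep]
        rw [List.take_replicate, Nat.min_def, if_pos (by omega), List.sum_replicate,
            nsmul_eq_mul]
        push_cast
        ring
      have h2 : mGet ms j = avg := by
        conv_lhs => rw [hrep]
        simp [mGet, List.getD_eq_getElem?_getD, hj]
      simp [term, h1, h2]
    apply le_antisymm
    · apply foldl_max_le _ _ _ le_rfl
      intro x hx
      simp only [List.mem_map, List.mem_range] at hx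
      obtain ⟨j, hj, rfl⟩ := hx
      exact le_of_eq (hterm j hj)
    · exact pot_nonneg ms avg

theorem setofList_replicate (n : Nat) (a : Int) (hn : 0 < n) :
    PySem.Set.ofList (List.replicate n a) = [a] := by
  obtain ⟨k, rfl⟩ : ∃ k, n = k + 1 := ⟨n - 1, by omega⟩
  show List.foldl PySem.Set.add PySem.Set.empty (List.replicate (k+1) a) = [a]
  rw [List.replicate_succ, List.foldl_cons]
  have h0 : PySem.Set.add PySem.Set.empty a = [a] := rfl
  rw [h0]
  induction k with
  | zero => rfl
  | succ i ih =>
    rw [List.replicate_succ, List.foldl_cons]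
    have : PySem.Set.add [a] a = [a] := by
      show (if List.contains [a] a then [a] else [a] ++ [a]) = [a]
      simp
    rw [this]
    exact ih (Nat.succ_pos i)

theorem setlen_two (ms : List Int) (x y : Int) (hx : x ∈ ms) (hy : y ∈ ms) (hxy : x ≠ y) :
    1 < PySem.Set.len (PySem.Set.ofList ms) := by
  have hxm : x ∈ PySem.Set.ofList ms := (PySem.Set.mem_ofList ms x).mpr hx
  have hym : y ∈ PySem.Set.ofList ms := (PySem.Set.mem_ofList ms y).mpr hy
  show 1 < ((PySem.Set.ofList ms).length : Int)
  rcases hl : PySem.Set.ofList ms with _ | ⟨a, _ | ⟨b, t⟩⟩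
  · rw [hl] at hxm; cases hxm
  · rw [hl] at hxm hym
    simp at hxm hym
    exact absurd (hxm.trans hym.symm) hxy
  · simp only [List.length_cons]
    push_cast
    omega

theorem all_eq_of_not_two (ms : List Int) (h : ¬ ∃ x ∈ ms, ∃ y ∈ ms, x ≠ y) :
    ∀ x ∈ ms, ∀ y ∈ ms, x = y := by
  intro x hx y hy
  by_contra hne
  exact h ⟨x, hx, y, hy, hne⟩

theorem replicate_of_all_eq (ms : List Int) (avg : Int) (hne : ms ≠ [])
    (hsum : ms.sum = (ms.length : Int) * avg)
    (hall : ∀ x ∈ ms, ∀ y ∈ ms, x = y) : ms = List.replicate ms.length avg := by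
  have hlen : 0 < ms.length := List.length_pos_iff.mpr hne
  have h0 : ms[0] ∈ ms := List.getElem_mem hlen
  have hrep : ms = List.replicate ms.length ms[0] := by
    apply List.ext_getElem (by simp)
    intro j h1 h2
    rw [List.getElem_replicate]
    exact hall _ (List.getElem_mem h1) _ h0
  have hsum2 : ms.sum = (ms.length : Int) * ms[0] := by
    conv_lhs => rw [hrep]
    rw [List.sum_replicate, nsmul_eq_mul]
  have hl : ((ms.length : Int)) ≠ 0 := by positivity
  have havg : avg = ms[0] := mul_left_cancel₀ hl (by rw [← hsum, ← hsum2])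
  rw [havg]
  exact hrep

theorem pmv_one (ms : List Int) (avg : Int) (j : Nat) (h : pmv ms avg j = 1) :
    ePre ms avg j < 0 ∧ 0 < mGet ms j := by
  cases j with
  | zero => simp [pmv] at h
  | succ i =>
    have h1 := mv_one ms avg i h
    exact ⟨h1.1, h1.2.1⟩

theorem pmv_negone (ms : List Int) (avg : Int) (j : Nat) (h : pmv ms avg j = -1) :
    0 < ePre ms avg j := by
  cases j with
  | zero => simp [pmv] at h
  | succ i => exact (mv_negone ms avg i h).1

theorem pmv_zero_neg (ms : List Int) (avg : Int) (j : Nat) (h : pmv ms avg j = 0)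
    (hj : j < ms.length) (hneg : ePre ms avg j < 0) : mGet ms j ≤ 0 := by
  cases j with
  | zero => simp [ePre] at hneg
  | succ i => exact ((mv_zero ms avg i h (by omega)).1 hneg)

theorem list_sum_zero_all_zero (l : List Int) (hnn : ∀ x ∈ l, 0 ≤ x) (hs : l.sum = 0) :
    ∀ x ∈ l, x = 0 := by
  induction l with
  | nil => simp
  | cons y t ih =>
    have hts : 0 ≤ t.sum := List.sum_nonneg (fun x hx => hnn x (List.mem_cons_of_mem _ hx))
    have hy : 0 ≤ y := hnn y List.mem_cons_self
    rw [List.sum_cons] at hs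
    intro x hx
    rcases List.mem_cons.mp hx with rfl | hx'
    · omega
    · exact ih (fun z hz => hnn z (List.mem_cons_of_mem _ hz)) (by omega) x hx'

theorem pass_dec (ms : List Int) (avg : Int)
    (hnn : ∀ x ∈ ms, 0 ≤ x) (hsum : ms.sum = (ms.length : Int) * avg)
    (hPot : 1 ≤ Pot ms avg) :
    Pot (newMach ms avg) avg = Pot ms avg - 1 ∧ (∀ x ∈ newMach ms avg, 0 ≤ x) ∧
      (newMach ms avg).sum = ((newMach ms avg).length : Int) * avg := by
  have hne : ms ≠ [] := by
    rintro rfl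
    simp [Pot] at hPot
  obtain ⟨k0, hk0⟩ : ∃ k, ms.length = k + 1 := by
    cases hms : ms with
    | nil => exact absurd hms hne
    | cons y t => exact ⟨t.length, by simp⟩
  set P := Pot ms avg with hP
  -- the loop only runs on unbalanced input, where the target level is positive
  have havg1 : 1 ≤ avg := by
    by_contra hc
    push Not at hc
    have h1 : (ms.length : Int) * avg ≤ 0 :=
      mul_nonpos_of_nonneg_of_nonpos (by positivity) (by omega)
    have h2 : 0 ≤ ms.sum := List.sum_nonneg hnn
    have h3 : ms.sum = 0 := by omega
    have h4 : avg = 0 := by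
      have : (ms.length : Int) * avg = 0 := by omega
      rcases mul_eq_zero.mp this with h | h
      · rw [hk0] at h; push_cast at h; omega
      · exact h
    have h5 : ms = List.replicate ms.length avg := by
      apply List.ext_getElem (by simp)
      intro j h1' h2'
      rw [List.getElem_replicate, h4]
      exact list_sum_zero_all_zero ms hnn h3 _ (List.getElem_mem h1')
    have := (pot_zero_iff ms avg).mpr h5
    omega
  have hmj : ∀ j, j < ms.length → 0 ≤ mGet ms j := fun j hj => hnn _ (mGet_mem ms j hj)
  have hub : ∀ j, j < ms.length → -P ≤ eBal ms avg j ∧ eBal ms avg j ≤ P := by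
    intro j hj
    have := abs_le.mp (eBal_abs_le ms avg j hj)
    omega
  have hpre : ∀ j, j < ms.length → -P ≤ ePre ms avg j ∧ ePre ms avg j ≤ P := by
    intro j hj
    cases j with
    | zero => simp [ePre]; omega
    | succ i => exact hub i (by omega)
  have hSb : ∀ j, j < ms.length → mGet ms j - avg ≤ P := fun j hj => surplus_le ms avg j hj
  have hlast : eBal ms avg k0 = 0 := eBal_last ms avg k0 hk0 hsum
  have hme : ∀ j, j < ms.length → mGet ms j = eBal ms avg j - ePre ms avg j + avg :=
    fun j hj => mGet_eq_e ms avg j hj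
  -- pointwise upper bound on the new prefix imbalances
  have hupper_e : ∀ j, j < ms.length → |eBal (newMach ms avg) avg j| ≤ P - 1 := by
    intro j hj
    rw [eBal_newMach ms avg j hj, abs_le]
    by_cases hjl : j = k0
    · subst hjl
      rw [mv_last ms avg j (by omega), hlast]
      omega
    have hj1 : j + 1 < ms.length := by omega
    have hbj := hub j hj
    rcases mv_mem ms avg j with hmv | hmv | hmv
    · have h1 := (mv_negone ms avg j hmv).1
      rw [hmv]; omega
    · rw [hmv]
      rcases lt_trichotomy (eBal ms avg j) 0 with hsgn | hsgn | hsgn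
      · have h1 := pmv ms avg j  -- dummy
        have h2 : mGet ms (j+1) ≤ 0 := (mv_zero ms avg j hmv hj1).1 hsgn
        have h3 : 0 ≤ mGet ms (j+1) := hmj (j+1) hj1
        have h4 := hme (j+1) hj1
        have h5 : ePre ms avg (j+1) = eBal ms avg j := rfl
        have h6 := hub (j+1) hj1
        omega
      · omega
      · rcases pmv_mem ms avg j with hp | hp | hp
        · have h2 : mGet ms j ≤ pmv ms avg j := (mv_zero ms avg j hmv hj1).2 hsgn (by omega)
          have h3 := hmj j hj
          omega
        · have h2 : mGet ms j ≤ pmv ms avg j := (mv_zero ms avg j hmv hj1).2 hsgn (by omega)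
          have h3 := hmj j hj
          have h4 := hme j hj
          have h5 := hpre j hj
          omega
        · have h2 := pmv_one ms avg j hp
          have h4 := hme j hj
          have h6 := hSb j hj
          omega
    · have h1 := (mv_one ms avg j hmv).1
      rw [hmv]; omega
  -- pointwise upper bound on the new surpluses
  have hupper_s : ∀ j, j < ms.length → mGet (newMach ms avg) j - avg ≤ P - 1 := by
    intro j hj
    rw [newMach_get ms avg j hj]
    have hbj := hub j hj
    have hprej := hpre j hj
    have hmej := hme j hj
    have hSj := hSb j hj
    have hmjj := hmj j hj
    rcases mv_mem ms avg j with hmv | hmv | hmv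
    · -- mv = -1
      obtain ⟨he, hp1, hplt, hj1⟩ := mv_negone ms avg j hmv
      rcases pmv_mem ms avg j with hp | hp | hp
      · have := pmv_negone ms avg j hp
        rw [hmv, hp]; omega
      · rw [hmv, hp]; omega
      · exact absurd hp hp1
    · -- mv = 0
      rcases pmv_mem ms avg j with hp | hp | hp
      · -- pmv = -1 : need S ≤ P-2
        have hpp := pmv_negone ms avg j hp
        rw [hmv, hp]
        by_contra hc
        push Not at hc
        have hejP : eBal ms avg j = P := by omega
        have hjne : j ≠ k0 := by
          intro hjeq; rw [hjeq, hlast] at hejP; omega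
        have hj1 : j + 1 < ms.length := by omega
        have h2 : mGet ms j ≤ pmv ms avg j := (mv_zero ms avg j hmv hj1).2 (by omega) (by omega)
        omega
      · -- pmv = 0 : need S ≤ P-1
        rw [hmv, hp]
        by_contra hc
        push Not at hc
        rcases lt_trichotomy (ePre ms avg j) 0 with hsgn | hsgn | hsgn
        · have h2 : mGet ms j ≤ 0 := pmv_zero_neg ms avg j hp hj hsgn
          omega
        · have hejP : eBal ms avg j = P := by omega
          have hjne : j ≠ k0 := by
            intro hjeq; rw [hjeq, hlast] at hejP; omega
          have hj1 : j + 1 < ms.length := by omega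
          have h2 : mGet ms j ≤ pmv ms avg j := (mv_zero ms avg j hmv hj1).2 (by omega) (by omega)
          omega
        · have hejP : eBal ms avg j ≥ P := by omega
          have hjne : j ≠ k0 := by
            intro hjeq; rw [hjeq] at hejP; rw [hlast] at hejP; omega
          have hj1 : j + 1 < ms.length := by omega
          have h2 : mGet ms j ≤ pmv ms avg j := (mv_zero ms avg j hmv hj1).2 (by omega) (by omega)
          omega
      · -- pmv = 1 : one dress was taken from machine j by its left neighbour
        rw [hmv, hp]; omega
    · -- mv = 1
      obtain ⟨he, hm1, hj1⟩ := mv_one ms avg j hmv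
      rcases pmv_mem ms avg j with hp | hp | hp
      · have := pmv_negone ms avg j hp
        rw [hmv, hp]; omega
      · -- pmv = 0 : need S ≤ P-2
        rw [hmv, hp]
        rcases lt_trichotomy (ePre ms avg j) 0 with hsgn | hsgn | hsgn
        · have h2 : mGet ms j ≤ 0 := pmv_zero_neg ms avg j hp hj hsgn
          omega
        · omega
        · omega
      · rw [hmv, hp]; omega
  -- every new term is at most P - 1
  have hub' : Pot (newMach ms avg) avg ≤ P - 1 := by
    apply foldl_max_le _ _ _ (by omega)
    intro x hx
    simp only [List.mem_map, List.mem_range, newMach_length] at hx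
    obtain ⟨j, hj, rfl⟩ := hx
    exact max_le (hupper_e j hj) (hupper_s j hj)
  -- the maximal term loses exactly one
  have hlb : P - 1 ≤ Pot (newMach ms avg) avg := by
    rcases foldl_max_attained ((List.range ms.length).map (term ms avg)) 0 with h | h
    · rw [hP] at hPot; unfold Pot at hPot; omega
    · simp only [List.mem_map, List.mem_range] at h
      obtain ⟨j, hj, hval⟩ := h
      have hterm : term ms avg j = P := hval
      have hjn : j < (newMach ms avg).length := by rw [newMach_length]; exact hj
      have hup : term (newMach ms avg) avg j ≤ Pot (newMach ms avg) avg :=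
        term_le_pot (newMach ms avg) avg j hjn
      rcases max_choice |eBal ms avg j| (mGet ms j - avg) with hc | hc <;>
        rw [term] at hterm
      · rw [hc] at hterm
        have habs : eBal ms avg j = P ∨ eBal ms avg j = -P := by
          rcases abs_cases (eBal ms avg j) with ⟨h1, _⟩ | ⟨h1, _⟩ <;> omega
        have hmvb := mv_mem ms avg j
        have hnew : P - 1 ≤ |eBal (newMach ms avg) avg j| := by
          rw [eBal_newMach ms avg j hj, le_abs]
          rcases habs with he | he <;> [left; right] <;> omega
        calc P - 1 ≤ |eBal (newMach ms avg) avg j| := hnew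
          _ ≤ term (newMach ms avg) avg j := le_max_left _ _
          _ ≤ _ := hup
      · rw [hc] at hterm
        have hd : -1 ≤ mv ms avg j - pmv ms avg j := by
          rcases mv_mem ms avg j with hmv | hmv | hmv
          · have := (mv_negone ms avg j hmv).2.1
            rcases pmv_mem ms avg j with hp | hp | hp <;> omega
          · rcases pmv_mem ms avg j with hp | hp | hp <;> omega
          · rcases pmv_mem ms avg j with hp | hp | hp <;> omega
        have hnew : P - 1 ≤ mGet (newMach ms avg) j - avg := by
          rw [newMach_get ms avg j hj]
          omega
        calc P - 1 ≤ mGet (newMach ms avg) j - avg := hnew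
          _ ≤ term (newMach ms avg) avg j := le_max_right _ _
          _ ≤ _ := hup
  refine ⟨by omega, newMach_nonneg ms avg hnn, ?_⟩
  rw [newMach_sum ms avg hne, newMach_length]
  exact hsum

theorem getD_append_of_len (A : List Int) (x : Int) (t : List Int) (k : Nat)
    (h : A.length = k) : (A ++ x :: t).getD k 0 = x := by
  subst h
  rw [List.getD_eq_getElem?_getD, List.getElem?_append_right le_rfl]
  simp

theorem set_append_of_len (A : List Int) (x v : Int) (t : List Int) (k : Nat)
    (h : A.length = k) : (A ++ x :: t).set k v = A ++ v :: t := by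
  subst h
  rw [List.set_append]
  simp

theorem getD_append_of_len1 (A : List Int) (x y : Int) (t : List Int) (k : Nat)
    (h : A.length = k) : (A ++ x :: y :: t).getD (k + 1) 0 = y := by
  subst h
  rw [List.getD_eq_getElem?_getD, List.getElem?_append_right (by omega)]
  simp

theorem set_append_of_len1 (A : List Int) (x y v : Int) (t : List Int) (k : Nat)
    (h : A.length = k) : (A ++ x :: y :: t).set (k + 1) v = A ++ x :: v :: t := by
  subst h
  rw [List.set_append, if_neg (by omega)]
  have h2 : A.length + 1 - A.length = 1 := by omega
  rw [h2]
  rfl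

theorem bridge_gen (ms : List Int) (avg : Int) :
    ∀ (d k : Nat) (M : PySem.Set Int),
      k + (d + 1) = ms.length →
      (((k : Int) ∈ M) ↔ pmv ms avg k = 1) →
      (∀ x ∈ M, x < (k : Int) + 1) →
      (ineffFor (ms.length : Int)
         (PySem.List.enumerate (((List.range ms.length).map (fun j : Nat => ((j:Int)+1) * avg)).drop k) k)
         ((List.range k).map (fun j => mGet ms j + mv ms avg j - pmv ms avg j)
            ++ (mGet ms k - pmv ms avg k) :: ms.drop (k+1),
          (ms.take k).sum + pmv ms avg k,
          M)).1
       = newMach ms avg := by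
  intro d
  induction d with
  | zero =>
    intro k M hk hmem hbound
    have hkn : k < ms.length := by omega
    have hmaplen : ((List.range ms.length).map (fun j : Nat => ((j:Int)+1) * avg)).length = ms.length := by
      simp
    rw [List.drop_eq_getElem_cons (by rw [hmaplen]; exact hkn), PySem.List.enumerate_cons]
    have hdrop2 : (((List.range ms.length).map (fun j : Nat => ((j:Int)+1) * avg)).drop (k+1)) = [] := by
      rw [List.drop_eq_nil_iff]
      omega
    rw [hdrop2]
    simp only [PySem.List.enumerate_nil, ineffFor]
    rw [if_pos (by omega : ((k : Int)) = (ms.length : Int) - 1)]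
    have hdropk1 : ms.drop (k+1) = [] := by rw [List.drop_eq_nil_iff]; omega
    have hmvk : mv ms avg k = 0 := mv_last ms avg k (by omega)
    unfold newMach
    rw [show ms.length = k + 1 from by omega, List.range_succ, List.map_append]
    simp [hdropk1, hmvk]
  | succ d ih =>
    intro k M hk hmem hbound
    have hkn : k < ms.length := by omega
    have hk1n : k + 1 < ms.length := by omega
    have hmaplen : ((List.range ms.length).map (fun j : Nat => ((j:Int)+1) * avg)).length = ms.length := by
      simp
    rw [List.drop_eq_getElem_cons (by rw [hmaplen]; exact hkn), PySem.List.enumerate_cons]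
    simp only [List.getElem_map, List.getElem_range]
    set A := (List.range k).map (fun j => mGet ms j + mv ms avg j - pmv ms avg j) with hA
    have hAlen : A.length = k := by simp [hA]
    have hdropk : ms.drop (k+1) = mGet ms (k+1) :: ms.drop (k+2) := by
      rw [List.drop_eq_getElem_cons hk1n, mGet_eq_getElem ms (k+1) hk1n]
    have hE : eBal ms avg k = (ms.take (k+1)).sum - ((k+1 : Nat) : Int)*avg := by
      unfold eBal; push_cast; ring
    have hcur : (ms.take k).sum + pmv ms avg k + (mGet ms k - pmv ms avg k)
        = (ms.take (k+1)).sum := by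
      have := take_sum_succ ms k hkn; omega
    simp only [ineffFor]
    rw [if_neg (by omega : ¬ ((k : Int)) = (ms.length : Int) - 1)]
    rw [PySem.List.pyGetD_natCast, getD_append_of_len A _ _ k hAlen, hcur]
    have hcast : ((k:Int)+1) = ((k+1 : Nat) : Int) := by push_cast; ring
    rw [hdropk]
    rw [hcast, PySem.List.pyGetD_natCast, getD_append_of_len1 A _ _ _ k hAlen]
    have hnm1 : ¬ (((k+1 : Nat) : Int) ∈ M) := by
      intro h
      have := hbound _ h
      push_cast at this
      omega
    have hmemk : (((k : Int)) ∈ M) ↔ pmv ms avg k = 1 := hmem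
    -- the three semantic branches
    by_cases hc1 : eBal ms avg k < 0 ∧ 0 < mGet ms (k+1)
    · -- branch 1: one dress moves k+1 → k
      have hmv1 : mv ms avg k = 1 := by
        rw [mv_eq_step]; unfold mvStep
        rw [if_pos hk1n, if_pos hc1]
      rw [if_pos (by
        refine ⟨?_, hc1.2, hnm1⟩
        have := hc1.1
        omega)]
      simp only [PySem.List.pySetD_natCast, PySem.List.pyGetD_natCast]
      rw [set_append_of_len A _ _ _ k hAlen]
      rw [getD_append_of_len1 A _ _ _ k hAlen]
      rw [set_append_of_len1 A _ _ _ _ k hAlen]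
      have hstep := ih (k+1) (M.add ((k+1 : Nat) : Int)) (by omega)
        (by
          rw [PySem.Set.mem_add]
          simp only [or_true, true_iff]
          show mv ms avg k = 1
          exact hmv1)
        (by
          intro x hx
          rcases (PySem.Set.mem_add _ _ _).mp hx with h | h
          · have := hbound _ h; push_cast at *; omega
          · subst h; push_cast; omega)
      rw [List.range_succ, List.map_append] at hstep
      simp only [List.map_cons, List.map_nil] at hstep
      rw [← hA] at hstep
      have hpmv1 : pmv ms avg (k+1) = 1 := hmv1
      rw [hpmv1, hmv1] at hstep
      have hn2 : k + 1 + 1 = k + 2 := rfl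
      have hx : mGet ms k + 1 - pmv ms avg k = mGet ms k - pmv ms avg k + 1 := by ring
      rw [hn2, hx, ← List.append_cons] at hstep
      exact hstep
    · by_cases hc2 : 0 < eBal ms avg k ∧ pmv ms avg k ≠ 1 ∧ pmv ms avg k < mGet ms k
      · -- branch 2: one dress moves k → k+1
        have hmv2 : mv ms avg k = -1 := by
          rw [mv_eq_step]; unfold mvStep
          rw [if_pos hk1n, if_neg hc1, if_pos hc2]
        rw [if_neg (by
          rintro ⟨h1, h2, -⟩
          exact hc1 ⟨by omega, h2⟩)]
        rw [if_pos (by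
          refine ⟨by have := hc2.1; omega, by have := hc2.2.2; omega, ?_⟩
          rw [hmemk]
          exact hc2.2.1)]
        simp only [PySem.List.pySetD_natCast, PySem.List.pyGetD_natCast]
        rw [set_append_of_len A _ _ _ k hAlen]
        rw [getD_append_of_len1 A _ _ _ k hAlen]
        rw [set_append_of_len1 A _ _ _ _ k hAlen]
        have hstep := ih (k+1) (M.add ((k : Nat) : Int)) (by omega)
          (by
            rw [PySem.Set.mem_add]
            constructor
            · rintro (h | h)
              · exact absurd h hnm1
              · exfalso; push_cast at h; omega
            · intro h
              exfalso
              have : pmv ms avg (k+1) = -1 := hmv2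
              omega)
          (by
            intro x hx
            rcases (PySem.Set.mem_add _ _ _).mp hx with h | h
            · have := hbound _ h; push_cast at *; omega
            · subst h; push_cast; omega)
        rw [List.range_succ, List.map_append] at hstep
        simp only [List.map_cons, List.map_nil] at hstep
        rw [← hA] at hstep
        have hpmv2 : pmv ms avg (k+1) = -1 := hmv2
        rw [hpmv2, hmv2] at hstep
        have hn2 : k + 1 + 1 = k + 2 := rfl
        have hx : mGet ms k + -1 - pmv ms avg k = mGet ms k - pmv ms avg k - 1 := by ring
        have hy : mGet ms (k+1) - -1 = mGet ms (k+1) + 1 := by ring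
        have hz : (List.take (k+1) ms).sum + -1 = (List.take (k+1) ms).sum - 1 := by ring
        rw [hn2, hx, hy, hz, ← List.append_cons] at hstep
        exact hstep
      · -- no move at this boundary
        have hmv0 : mv ms avg k = 0 := by
          rw [mv_eq_step]; unfold mvStep
          rw [if_pos hk1n, if_neg hc1, if_neg hc2]
        rw [if_neg (by
          rintro ⟨h1, h2, -⟩
          exact hc1 ⟨by omega, h2⟩)]
        rw [if_neg (by
          rintro ⟨h1, h2, h3⟩
          rw [hmemk] at h3
          exact hc2 ⟨by omega, h3, by omega⟩)]
        have hstep := ih (k+1) M (by omega)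
          (by
            constructor
            · intro h; exact absurd h hnm1
            · intro h
              exfalso
              have : pmv ms avg (k+1) = 0 := hmv0
              omega)
          (by
            intro x hx
            have := hbound _ hx
            push_cast at *
            omega)
        rw [List.range_succ, List.map_append] at hstep
        simp only [List.map_cons, List.map_nil] at hstep
        rw [← hA] at hstep
        have hpmv0 : pmv ms avg (k+1) = 0 := hmv0
        rw [hpmv0, hmv0] at hstep
        have hn2 : k + 1 + 1 = k + 2 := rfl
        have hx : mGet ms k + 0 - pmv ms avg k = mGet ms k - pmv ms avg k := by ring
        have hy : mGet ms (k+1) - 0 = mGet ms (k+1) := by ring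
        have hz : (List.take (k+1) ms).sum + 0 = (List.take (k+1) ms).sum := by ring
        rw [hn2, hx, hy, hz, ← List.append_cons] at hstep
        exact hstep

theorem pass_bridge (ms : List Int) (avg : Int) (hne : ms ≠ []) :
    (ineffFor (ms.length : Int)
        (PySem.List.enumerate ((List.range ms.length).map (fun j : Nat => ((j:Int)+1) * avg)) 0)
        (ms, 0, PySem.Set.empty)).1 = newMach ms avg := by
  obtain ⟨k0, hk0⟩ : ∃ k, ms.length = k + 1 := by
    cases hms : ms with
    | nil => exact absurd hms hne
    | cons y t => exact ⟨t.length, by simp⟩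
  have h := bridge_gen ms avg k0 0 PySem.Set.empty (by omega)
    (by
      constructor
      · intro h; cases h
      · intro h; simp [pmv] at h)
    (by intro x hx; cases hx)
  rcases hms : ms with _ | ⟨y, t⟩
  · exact absurd hms hne
  · rw [hms] at h
    simpa [pmv, mGet] using h

theorem bfold_eq_pot (ms : List Int) (avg : Int) :
    (ms.foldl (fun (st : Int × Int) x =>
      let bal := st.2 + (x - avg)
      (max (max st.1 |bal|) (x - avg), bal)) (0, 0)).1 = Pot ms avg := by
  have h := bfold_gen ms avg ms.length 0 0 (by omega)
  simpa [Pot, List.range_eq_range'] using h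

theorem natAbs_sum_eq (ms : List Int) (hnn : ∀ x ∈ ms, 0 ≤ x) :
    ((ms.map Int.natAbs).sum : Int) = ms.sum := by
  induction ms with
  | nil => simp
  | cons y t ih =>
    simp only [List.map_cons, List.sum_cons, Nat.cast_add]
    rw [Int.natAbs_of_nonneg (hnn y List.mem_cons_self),
        ih (fun z hz => hnn z (List.mem_cons_of_mem _ hz))]

theorem pot_le_sum (ms : List Int) (avg : Int) (hne : ms ≠ []) (hnn : ∀ x ∈ ms, 0 ≤ x)
    (hsum : ms.sum = (ms.length : Int) * avg) : Pot ms avg ≤ ms.sum := by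
  have hlp : 0 < ms.length := List.length_pos_iff.mpr hne
  have hlpi : (0:Int) < (ms.length : Int) := by exact_mod_cast hlp
  have hs0 : 0 ≤ ms.sum := List.sum_nonneg hnn
  have havg0 : 0 ≤ avg := by
    by_contra hc
    push Not at hc
    have h1 : (ms.length : Int) * avg < 0 := mul_neg_of_pos_of_neg hlpi hc
    linarith
  apply foldl_max_le _ _ _ hs0
  intro x hx
  simp only [List.mem_map, List.mem_range] at hx
  obtain ⟨j, hj, rfl⟩ := hx
  apply max_le
  · rw [abs_le]
    have t1 := take_sum_nonneg ms hnn (j+1)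
    have t2 := take_sum_le ms hnn (j+1)
    have t3 : 0 ≤ ((j:Int)+1) * avg := by positivity
    have t4 : (((j:Int))+1) * avg ≤ (ms.length : Int) * avg := by
      apply mul_le_mul_of_nonneg_right _ havg0
      have : (j:Int) + 1 ≤ (ms.length : Int) := by exact_mod_cast Nat.succ_le_of_lt hj
      exact this
    unfold eBal
    constructor <;> push_cast <;> linarith
  · have t1 := take_sum_le ms hnn (j+1)
    have t2 := take_sum_nonneg ms hnn j
    have t5 := take_sum_succ ms j hj
    linarith

theorem pyAccumulate_replicate (per : Int) :
    ∀ (n : Nat) (a : Int), pyAccumulate a (List.replicate n per)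
      = (List.range n).map (fun j : Nat => a + ((j:Int)+1) * per) := by
  intro n
  induction n with
  | zero => intro a; simp [pyAccumulate]
  | succ m ih =>
    intro a
    rw [List.replicate_succ]
    show (a + per) :: pyAccumulate (a + per) (List.replicate m per) = _
    rw [ih (a + per), List.range_succ_eq_map]
    simp only [List.map_cons, List.map_map]
    congr 1
    · push_cast; ring
    · apply List.map_congr_left
      intro x hx
      simp only [Function.comp_apply]
      push_cast
      ring

theorem pyAccumulate_replicate0 (per : Int) (n : Nat) :
    pyAccumulate 0 (List.replicate n per)
      = (List.range n).map (fun j : Nat => ((j:Int)+1) * per) := by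
  rw [pyAccumulate_replicate]
  apply List.map_congr_left
  intro x hx
  ring

theorem while_eq (n0 : Nat) (avg : Int) :
    ∀ (P : Nat), ∀ (fuel : Nat), P < fuel → ∀ (mach : List Int) (moves : Int),
      mach ≠ [] → mach.length = n0 → (∀ x ∈ mach, 0 ≤ x) →
      mach.sum = (n0 : Int) * avg → Pot mach avg = (P : Int) →
      ineffWhile ((List.range n0).map (fun j : Nat => ((j:Int)+1) * avg)) (n0 : Int) fuel mach moves
        = moves + (P : Int) := by
  intro P
  induction P with
  | zero =>
    intro fuel hf mach moves hne hlen hnn hsum hpot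
    cases fuel with
    | zero => omega
    | succ f =>
      have hlp : 0 < mach.length := List.length_pos_iff.mpr hne
      have hrep : mach = List.replicate mach.length avg :=
        (pot_zero_iff mach avg).mp (by simpa using hpot)
      have hofl : PySem.Set.ofList mach = [avg] := by
        conv_lhs => rw [hrep]
        exact setofList_replicate _ _ hlp
      simp only [ineffWhile]
      rw [if_neg (by simp [hofl, PySem.Set.len])]
      simp
  | succ P ih =>
    intro fuel hf mach moves hne hlen hnn hsum hpot
    cases fuel with
    | zero => omega
    | succ f =>
      have hlp : 0 < mach.length := List.length_pos_iff.mpr hne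
      have hsum' : mach.sum = (mach.length : Int) * avg := by rw [hlen]; exact hsum
      have hpos : 1 ≤ Pot mach avg := by rw [hpot]; push_cast; omega
      have hnrep : mach ≠ List.replicate mach.length avg := by
        intro h
        have := (pot_zero_iff mach avg).mpr h
        omega
      have hex : ∃ x ∈ mach, ∃ y ∈ mach, x ≠ y := by
        by_contra hc
        exact hnrep (replicate_of_all_eq mach avg hne hsum' (all_eq_of_not_two mach hc))
      obtain ⟨x, hx, y, hy, hxy⟩ := hex
      have hcond : 1 < PySem.Set.len (PySem.Set.ofList mach) := setlen_two mach x y hx hy hxy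
      simp only [ineffWhile]
      rw [if_pos hcond]
      have hbridge := pass_bridge mach avg hne
      rw [hlen] at hbridge
      rw [hbridge]
      obtain ⟨hdec, hnn', hsum''⟩ := pass_dec mach avg hnn hsum' hpos
      have hlen' : (newMach mach avg).length = n0 := by rw [newMach_length]; exact hlen
      have hne' : newMach mach avg ≠ [] := by
        apply List.ne_nil_of_length_pos
        rw [newMach_length]
        exact hlp
      have hsum3 : (newMach mach avg).sum = (n0 : Int) * avg := by
        rw [hsum'', hlen']
      have hpot' : Pot (newMach mach avg) avg = (P : Int) := by
        rw [hdec, hpot]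
        push_cast
        ring
      rw [ih f (by omega) (newMach mach avg) (moves + 1) hne' hlen' hnn' hsum3 hpot']
      push_cast
      ring

-- ===== VERDICT (by name: the statement is the Claim_ definition above) =====
theorem inefficient_spec : Claim_equal_inefficient := by
  intro ms hdom hpre
  obtain ⟨hne, hrest⟩ := hpre
  unfold Spec_inefficient
  have hlp : 0 < ms.length := List.length_pos_iff.mpr hne
  have hlpi : (0:Int) < (ms.length : Int) := by exact_mod_cast hlp
  simp only [inefficient, inefficient_alt]
  by_cases hmod : PySem.Int.mod ms.sum (ms.length : Int) = 0
  · rw [if_neg (by simpa using hmod), if_neg (by simpa using hmod)]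
    set avg := PySem.Int.floordiv ms.sum (ms.length : Int) with havg
    have hdvd : ((ms.length : Int)) ∣ ms.sum := (PySem.Int.mod_eq_zero_iff_dvd _ _).mp hmod
    have hsum : ms.sum = (ms.length : Int) * avg := by
      rw [havg, PySem.Int.floordiv_eq_ediv_of_pos hlpi]
      exact (Int.mul_ediv_cancel' hdvd).symm
    rw [bfold_eq_pot ms avg, pyAccumulate_replicate0 avg ms.length]
    have hlevlen : (((List.range ms.length).map (fun j : Nat => ((j:Int)+1) * avg)).length) = ms.length := by
      simp
    rw [hlevlen]
    have hemod : ms.sum % (ms.length : Int) = 0 := by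
      rw [← PySem.Int.mod_eq_emod_of_pos hlpi]
      exact hmod
    rcases hrest with hmodne | hnn | hall
    · exact absurd hemod hmodne
    · -- nonnegative loads: the simulated pass count equals the potential
      have hPnn : 0 ≤ Pot ms avg := pot_nonneg ms avg
      have hfuel : (Pot ms avg).toNat < (ms.map Int.natAbs).sum + 1 := by
        have h1 := natAbs_sum_eq ms hnn
        have h2 := pot_le_sum ms avg hne hnn hsum
        omega
      rw [while_eq ms.length avg (Pot ms avg).toNat ((ms.map Int.natAbs).sum + 1) hfuel ms 0
          hne rfl hnn hsum (by rw [Int.toNat_of_nonneg hPnn])]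
      rw [Int.toNat_of_nonneg hPnn]
      ring
    · -- an already-constant list: the loop is never entered, both sides give 0
      have hrep := replicate_of_all_eq ms avg hne hsum hall
      have hpot0 : Pot ms avg = 0 := (pot_zero_iff ms avg).mpr hrep
      have hofl : PySem.Set.ofList ms = [avg] := by
        conv_lhs => rw [hrep]
        exact setofList_replicate _ _ hlp
      simp only [ineffWhile]
      rw [if_neg (by simp [hofl, PySem.Set.len])]
      rw [hpot0]
  · rw [if_pos (by simpa using hmod), if_pos (by simpa using hmod)]
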